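-- pv_equiv track=rewrite | github.com/Lau36/ProyectoIA2 | minmax.py | juego_terminado
-- ===== SOURCE A (Python) =====
-- def juego_terminado(tablero):
--     numeros = list(range(1, 8))
--     terminado = False
--     for fila in tablero:
--         for numero in fila:
--             if numero in numeros:
--                 return False  # aqui mira que no todos los numeros del tablero son diferentes de 1 a 7
--     return True
-- ===== SOURCE B (Python) =====
-- def juego_terminado(tablero):
--     total = 0
--     for objetivo in range(1, 8):
--         for fila in tablero:
--             total += fila.count(objetivo)
--     return total == 0
-- ===== Notes on version B (the rewrite author's own statement) =====
-- stated objective: alternative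
-- what changed: B inverts the loop order: it iterates over the seven target values, sums fila.count(objetivo) over all rows, and returns whether the grand total is zero, replacing A's early-return nested membership scan over board cells.
import Mathlib
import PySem

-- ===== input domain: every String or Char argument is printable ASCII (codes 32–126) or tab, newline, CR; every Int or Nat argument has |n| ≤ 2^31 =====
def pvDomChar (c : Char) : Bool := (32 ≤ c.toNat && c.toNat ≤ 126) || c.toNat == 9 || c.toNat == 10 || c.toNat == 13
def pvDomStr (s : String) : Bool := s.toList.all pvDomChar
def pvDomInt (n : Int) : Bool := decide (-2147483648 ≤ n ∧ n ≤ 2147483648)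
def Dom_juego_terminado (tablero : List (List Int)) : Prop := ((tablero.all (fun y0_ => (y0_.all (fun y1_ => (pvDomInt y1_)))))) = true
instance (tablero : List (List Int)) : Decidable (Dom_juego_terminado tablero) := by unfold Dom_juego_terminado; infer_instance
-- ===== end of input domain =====

-- B inverts the loops: it iterates over the seven target values, sums fila.count(objetivo) over all rows, and tests the total for zero (alternative decomposition; same result).
-- ===== PORT A =====
-- inner 'for numero in fila' loop: some false = early return, none = fall through
def jtInner (numeros : List Int) : List Int → Option Bool
  | [] => none
  | n :: rest => if numeros.contains n then some false else jtInner numeros rest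

-- outer 'for fila in tablero' loop
def jtOuter (numeros : List Int) : List (List Int) → Bool
  | [] => true
  | fila :: rest =>
    match jtInner numeros fila with
    | some b => b
    | none => jtOuter numeros rest

def juego_terminado (tablero : List (List Int)) : Bool :=
  let numeros := PySem.List.pyRange 1 8 1
  jtOuter numeros tablero

-- ===== PORT B =====
def juego_terminado_alt (tablero : List (List Int)) : Bool :=
  let total : Int :=
    (PySem.List.pyRange 1 8 1).foldl
      (fun total objetivo =>
        tablero.foldl (fun total fila => total + (PySem.List.count fila objetivo : Int)) total)
      0
  total == 0

-- ===== PRECONDITION & SPEC =====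
def Spec_juego_terminado (tablero : List (List Int)) (out : Bool) : Prop := out = juego_terminado_alt tablero
instance (tablero : List (List Int)) (out : Bool) : Decidable (Spec_juego_terminado tablero out) := by unfold Spec_juego_terminado; infer_instance

-- ===== CLAIM (what is proved, stated in full; the proofs are below) =====
def Claim_equal_juego_terminado : Prop := ∀ (tablero : List (List Int)), Dom_juego_terminado tablero → Spec_juego_terminado tablero (juego_terminado tablero)

-- ===== LEMMAS AND PROOFS =====

lemma jtInner_eq (numeros fila : List Int) :
    jtInner numeros fila = if fila.any numeros.contains then some false else none := by
  induction fila with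
  | nil => simp [jtInner]
  | cons n rest ih => by_cases h : n ∈ numeros <;> simp [jtInner, List.any_cons, h, ih]

lemma jtOuter_eq (numeros : List Int) (t : List (List Int)) :
    jtOuter numeros t = !(t.any (fun fila => fila.any numeros.contains)) := by
  induction t with
  | nil => simp [jtOuter]
  | cons fila rest ih =>
    by_cases h : fila.any numeros.contains <;>
      simp [jtOuter, jtInner_eq, h, ih]

lemma inner_foldl_eq (t : List (List Int)) (obj : Int) (a : Int) :
    t.foldl (fun total fila => total + (PySem.List.count fila obj : Int)) a
      = a + (t.map (fun fila => (PySem.List.count fila obj : Int))).sum :=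
  PySem.List.foldl_add _ _ _

lemma total_eq (t : List (List Int)) (numeros : List Int) (a : Int) :
    numeros.foldl
      (fun total objetivo =>
        t.foldl (fun total fila => total + (PySem.List.count fila objetivo : Int)) total) a
      = a + (numeros.map (fun obj => (t.map (fun fila => (PySem.List.count fila obj : Int))).sum)).sum := by
  induction numeros generalizing a with
  | nil => simp
  | cons obj rest ih =>
    rw [List.foldl_cons, inner_foldl_eq, ih, List.map_cons, List.sum_cons]
    ring

lemma nat_sum_zero (l : List Nat) : l.sum = 0 ↔ ∀ x ∈ l, x = 0 := by
  induction l with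
  | nil => simp
  | cons a r ih => simp [ih]

lemma total_zero_iff (t : List (List Int)) (numeros : List Int) :
    ((numeros.map (fun obj => (t.map (fun fila => (PySem.List.count fila obj : Int))).sum)).sum = 0)
      ↔ ¬ t.any (fun fila => fila.any numeros.contains) := by
  have hc : ∀ obj : Int, (t.map (fun fila => (PySem.List.count fila obj : Int))).sum
      = ((t.map (fun fila => PySem.List.count fila obj)).sum : Int) := by
    intro obj
    rw [Nat.cast_list_sum, List.map_map]
    rfl
  have houter : ((numeros.map (fun obj => (t.map (fun fila => (PySem.List.count fila obj : Int))).sum)).sum)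
      = ((numeros.map (fun obj => (t.map (fun fila => PySem.List.count fila obj)).sum)).sum : Int) := by
    simp only [hc]
    rw [Nat.cast_list_sum, List.map_map]
    rfl
  rw [houter, Int.natCast_eq_zero, nat_sum_zero]
  constructor
  · intro h hany
    obtain ⟨fila, hf, hfa⟩ := List.any_eq_true.mp hany
    obtain ⟨n, hn, hmem⟩ := List.any_eq_true.mp hfa
    simp only [List.contains_eq_mem, decide_eq_true_eq] at hmem
    have h1 := h _ (List.mem_map.mpr ⟨n, hmem, rfl⟩)
    rw [nat_sum_zero] at h1
    have h2 := h1 _ (List.mem_map.mpr ⟨fila, hf, rfl⟩)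
    rw [PySem.List.count_eq, List.count_eq_zero] at h2
    exact h2 hn
  · intro h x hx
    obtain ⟨obj, hobj, rfl⟩ := List.mem_map.mp hx
    rw [nat_sum_zero]
    intro y hy
    obtain ⟨fila, hf, rfl⟩ := List.mem_map.mp hy
    rw [PySem.List.count_eq, List.count_eq_zero]
    intro hmem
    exact h (List.any_eq_true.mpr ⟨fila, hf, List.any_eq_true.mpr ⟨obj, hmem, by simp [hobj]⟩⟩)

-- ===== VERDICT (by name: the statement is the Claim_ definition above) =====
theorem juego_terminado_spec : Claim_equal_juego_terminado := by
  intro t _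
  unfold Spec_juego_terminado juego_terminado juego_terminado_alt
  rw [jtOuter_eq, total_eq, zero_add, Bool.eq_iff_iff]
  simp only [beq_iff_eq, Bool.not_eq_eq_eq_not, Bool.not_true, ← Bool.not_eq_true]
  exact (total_zero_iff t _).symm
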